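-- pv_equiv track=rewrite | github.com/thaiduongx26/relation_extraction_cdr | data_loaders/alps_dataset.py | gen_samples
-- ===== SOURCE A (Python) =====
-- def gen_samples(data_text_raw):
--     data = []
--     data_cluster = []
--     for ids in range(len(data_text_raw)):
--         if data_text_raw[ids] != '\n':
--             data_cluster.append(data_text_raw[ids])
--         else:
--             if len(data_cluster) != 0:
--                 data.append(data_cluster)
--             data_cluster = []
--     return data
-- ===== SOURCE B (Python) =====
-- def gen_samples(data_text_raw):
--     # index the separator positions first, then slice between them;
--     # anything after the last '\n' is never reached, matching the task
--     seps = [i for i, x in enumerate(data_text_raw) if x == '\n']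
--     data = []
--     prev = 0
--     for p in seps:
--         group = data_text_raw[prev:p]
--         if group:
--             data.append(group)
--         prev = p + 1
--     return data
-- ===== Notes on version B (the rewrite author's own statement) =====
-- stated objective: alternative
-- what changed: B first collects the indices of the '\n' separators (enumerate+filter) and then slices data_text_raw[prev:p] between consecutive separators, keeping non-empty slices, instead of A's element-by-element loop that accumulates a running cluster and flushes it at each '\n'; both drop empty runs and any trailing run not followed by '\n'.
import Mathlib
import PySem

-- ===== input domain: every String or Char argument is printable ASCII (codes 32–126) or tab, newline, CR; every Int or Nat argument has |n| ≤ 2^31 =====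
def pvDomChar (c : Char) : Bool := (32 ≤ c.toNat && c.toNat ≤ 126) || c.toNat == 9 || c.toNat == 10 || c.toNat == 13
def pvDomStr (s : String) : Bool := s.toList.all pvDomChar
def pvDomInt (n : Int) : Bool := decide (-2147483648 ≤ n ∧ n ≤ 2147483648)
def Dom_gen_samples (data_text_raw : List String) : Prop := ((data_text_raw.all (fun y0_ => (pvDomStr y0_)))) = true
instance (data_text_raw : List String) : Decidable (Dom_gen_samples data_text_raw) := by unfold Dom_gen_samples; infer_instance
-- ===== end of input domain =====

-- B indexes the '\n' separator positions first and slices between them, instead of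
-- A's element-by-element accumulation; objective: alternative decomposition, same cost.

-- ===== PORT A =====
-- loop body of A: append to the cluster, or flush a non-empty cluster on '\n'
def pvAStep (acc : List (List String) × List String) (x : String) :
    List (List String) × List String :=
  if x ≠ "\n" then (acc.1, acc.2 ++ [x])
  else (if acc.2 ≠ [] then acc.1 ++ [acc.2] else acc.1, [])

-- element-by-element loop over range(len(..)), accumulating (data, data_cluster)
def gen_samples (data_text_raw : List String) : List (List String) :=
  ((PySem.List.pyRange 0 (data_text_raw.length : Int) 1).foldl
    (fun acc ids => pvAStep acc (PySem.List.pyGetD data_text_raw ids ""))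
    ([], [])).1

-- ===== PORT B =====
-- loop body of B: slice data_text_raw[prev:p], keep it if non-empty, prev := p + 1
def pvBStep (data_text_raw : List String) (acc : List (List String) × Int) (p : Int) :
    List (List String) × Int :=
  let group := PySem.List.slice data_text_raw (some acc.2) (some p)
  (if group ≠ [] then acc.1 ++ [group] else acc.1, p + 1)

-- separator positions via enumerate-filter, then fold over them slicing between
def gen_samples_alt (data_text_raw : List String) : List (List String) :=
  let seps := ((PySem.List.enumerate data_text_raw 0).filter
                  (fun p => p.2 == "\n")).map (·.1)
  (seps.foldl (pvBStep data_text_raw) ([], 0)).1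

-- ===== PRECONDITION & SPEC =====
def Spec_gen_samples (data_text_raw : List String) (out : List (List String)) : Prop := out = gen_samples_alt data_text_raw
instance (data_text_raw : List String) (out : List (List String)) : Decidable (Spec_gen_samples data_text_raw out) := by unfold Spec_gen_samples; infer_instance

-- ===== CLAIM (what is proved, stated in full; the proofs are below) =====
def Claim_equal_gen_samples : Prop := ∀ (data_text_raw : List String), Dom_gen_samples data_text_raw → Spec_gen_samples data_text_raw (gen_samples data_text_raw)

-- ===== LEMMAS AND PROOFS =====

-- common specification both loops are reduced to
def pvSpecLoop : List String → List String → List (List String)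
  | [], _ => []
  | x :: xs, cl =>
      if x = "\n" then (if cl = [] then pvSpecLoop xs [] else cl :: pvSpecLoop xs [])
      else pvSpecLoop xs (cl ++ [x])

-- indices of '\n' occurrences, structurally
def pvNlIdx : List String → List Int
  | [] => []
  | x :: xs => if x = "\n" then 0 :: (pvNlIdx xs).map (· + 1) else (pvNlIdx xs).map (· + 1)

theorem pvA_loop (l : List String) :
    ∀ (d : List (List String)) (c : List String),
    (l.foldl pvAStep (d, c)).1 = d ++ pvSpecLoop l c := by
  induction l with
  | nil => intro d c; simp [pvSpecLoop]
  | cons x xs ih =>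
      intro d c
      rw [List.foldl_cons]
      by_cases hx : x = "\n"
      · have hstep : pvAStep (d, c) x = (if c ≠ [] then d ++ [c] else d, []) := by
          simp [pvAStep, hx]
        rw [hstep]
        by_cases hc : c = [] <;> simp [hc, ih, pvSpecLoop, hx]
      · have hstep : pvAStep (d, c) x = (d, c ++ [x]) := by simp [pvAStep, hx]
        rw [hstep, ih]
        simp [pvSpecLoop, hx]

theorem pvSeps_eq (l : List String) : ∀ (s : Int),
    ((PySem.List.enumerate l s).filter (fun p => p.2 == "\n")).map (·.1)
      = (pvNlIdx l).map (· + s) := by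
  induction l with
  | nil => intro s; simp [PySem.List.enumerate_nil, pvNlIdx]
  | cons x xs ih =>
      intro s
      by_cases hx : x = "\n" <;>
        simp [PySem.List.enumerate_cons, pvNlIdx, hx, ih (s + 1),
              List.map_map, Function.comp_def, add_comm, add_left_comm]

theorem pvB_loop (tail : List String) :
    ∀ (L : List String) (st prev : Nat) (out : List (List String)),
    st ≤ prev → L.drop prev = tail →
    (((pvNlIdx tail).map (· + (prev : Int))).foldl (pvBStep L) (out, (st : Int))).1
      = out ++ pvSpecLoop tail (PySem.List.slice L (some (st : Int)) (some (prev : Int))) := by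
  induction tail with
  | nil =>
      intro L st prev out _ _
      simp only [pvNlIdx, List.map_nil, List.foldl_nil, pvSpecLoop, List.append_nil]
  | cons x xs ih =>
      intro L st prev out hle hdrop
      have hdrop' : L.drop (prev + 1) = xs := by
        have h := congrArg List.tail hdrop
        rw [List.tail_drop] at h
        simpa using h
      have hcomp : ((pvNlIdx xs).map (· + 1)).map (· + (prev : Int))
          = (pvNlIdx xs).map (· + ((prev + 1 : Nat) : Int)) := by
        rw [List.map_map]
        apply List.map_congr_left
        intro a _
        simp only [Function.comp_apply]
        push_cast
        ring
      by_cases hx : x = "\n"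
      · -- separator at position prev: emit the current slice, restart at prev + 1
        have hlist : (pvNlIdx (x :: xs)).map (· + (prev : Int))
            = (prev : Int) :: (pvNlIdx xs).map (· + ((prev + 1 : Nat) : Int)) := by
          simp [pvNlIdx, hx, hcomp]
        have hstep : pvBStep L (out, (st : Int)) (prev : Int)
            = ((if PySem.List.slice L (some (st : Int)) (some (prev : Int)) ≠ []
                then out ++ [PySem.List.slice L (some (st : Int)) (some (prev : Int))]
                else out), ((prev + 1 : Nat) : Int)) := by
          simp [pvBStep]
        have hemp : PySem.List.slice L (some ((prev + 1 : Nat) : Int)) (some ((prev + 1 : Nat) : Int)) = [] := by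
          rw [PySem.List.slice_natCast]; simp
        rw [hlist, List.foldl_cons, hstep,
            ih L (prev + 1) (prev + 1) _ le_rfl hdrop', hemp]
        by_cases hg : PySem.List.slice L (some (st : Int)) (some (prev : Int)) = [] <;>
          simp [pvSpecLoop, hx, hg]
      · -- ordinary element: the current slice grows by x
        have hget : L[prev]? = some x := by
          have h0 : (L.drop prev)[0]? = some x := by rw [hdrop]; rfl
          simpa [List.getElem?_drop] using h0
        have hgrow : PySem.List.slice L (some (st : Int)) (some ((prev + 1 : Nat) : Int))
            = PySem.List.slice L (some (st : Int)) (some ((prev : Nat) : Int)) ++ [x] := by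
          rw [PySem.List.slice_natCast, PySem.List.slice_natCast]
          have h1 : prev + 1 - st = (prev - st) + 1 := by omega
          rw [h1, List.take_add_one]
          have h2 : (L.drop st)[prev - st]? = some x := by
            rw [List.getElem?_drop]
            have h3 : st + (prev - st) = prev := by omega
            rw [h3, hget]
          simp [h2]
        have hlist : (pvNlIdx (x :: xs)).map (· + (prev : Int))
            = (pvNlIdx xs).map (· + ((prev + 1 : Nat) : Int)) := by
          simp [pvNlIdx, hx, hcomp]
        rw [hlist, ih L st (prev + 1) out (by omega) hdrop', hgrow]
        simp [pvSpecLoop, hx]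

-- ===== VERDICT (by name: the statement is the Claim_ definition above) =====
theorem gen_samples_spec : Claim_equal_gen_samples := by
  intro l _
  unfold Spec_gen_samples gen_samples gen_samples_alt
  rw [PySem.List.foldl_pyRange_pyGetD' l "" pvAStep ([], []) le_rfl, pvA_loop, pvSeps_eq l 0]
  have hB := pvB_loop l l 0 0 [] le_rfl (by simp)
  simp only [Nat.cast_zero] at hB
  rw [hB]
  simp [pysem]
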